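-- pv_equiv track=rewrite | github.com/hieunguyentr/Smart-Voice-Home-Assistant | code/home_assistant_ai/pi_voice_runtime_openai.py | _normalize_planner_targets
-- ===== SOURCE A (Python) =====
-- def _normalize_planner_targets(raw_targets):
--     if raw_targets is None:
--         return []
--     if isinstance(raw_targets, str):
--         raw_targets = [raw_targets]
--     if not isinstance(raw_targets, list):
--         return []
--     devices = []
--     for item in raw_targets:
--         if not isinstance(item, str):
--             continue
--         key = item.strip().lower()
--         if key in {"all", "everything"}:
--             for name in ("fan", "red_light", "green_light"):
--                 if name not in devices:
--                     devices.append(name)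
--             continue
--         if key in {"all_lights", "lights", "both_lights"}:
--             for name in ("red_light", "green_light"):
--                 if name not in devices:
--                     devices.append(name)
--             continue
--         alias_map = {
--             "fan": "fan",
--             "relay": "fan",
--             "red": "red_light",
--             "red light": "red_light",
--             "red_light": "red_light",
--             "green": "green_light",
--             "green light": "green_light",
--             "green_light": "green_light",
--         }
--         mapped = alias_map.get(key)
--         if mapped and mapped not in devices:
--             devices.append(mapped)
--     return devices
-- ===== SOURCE B (Python) =====
-- _EXPANSION = {
--     "all": ["fan", "red_light", "green_light"],
--     "everything": ["fan", "red_light", "green_light"],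
--     "all_lights": ["red_light", "green_light"],
--     "lights": ["red_light", "green_light"],
--     "both_lights": ["red_light", "green_light"],
--     "fan": ["fan"],
--     "relay": ["fan"],
--     "red": ["red_light"],
--     "red light": ["red_light"],
--     "red_light": ["red_light"],
--     "green": ["green_light"],
--     "green light": ["green_light"],
--     "green_light": ["green_light"],
-- }
--
--
-- def _normalize_planner_targets(raw_targets):
--     if raw_targets is None:
--         return []
--     if isinstance(raw_targets, str):
--         raw_targets = [raw_targets]
--     if not isinstance(raw_targets, list):
--         return []
--     expanded = []
--     for item in raw_targets:
--         if isinstance(item, str):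
--             expanded.extend(_EXPANSION.get(item.strip().lower(), []))
--     return list(dict.fromkeys(expanded))
-- ===== Notes on version B (the rewrite author's own statement) =====
-- stated objective: simpler
-- what changed: Replaces A's three in-loop branch cases each doing inline 'not in devices' dedup appends with one unified key-to-targets expansion table folded into a flat list, followed by a single order-preserving dict.fromkeys dedup pass.
import Mathlib
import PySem

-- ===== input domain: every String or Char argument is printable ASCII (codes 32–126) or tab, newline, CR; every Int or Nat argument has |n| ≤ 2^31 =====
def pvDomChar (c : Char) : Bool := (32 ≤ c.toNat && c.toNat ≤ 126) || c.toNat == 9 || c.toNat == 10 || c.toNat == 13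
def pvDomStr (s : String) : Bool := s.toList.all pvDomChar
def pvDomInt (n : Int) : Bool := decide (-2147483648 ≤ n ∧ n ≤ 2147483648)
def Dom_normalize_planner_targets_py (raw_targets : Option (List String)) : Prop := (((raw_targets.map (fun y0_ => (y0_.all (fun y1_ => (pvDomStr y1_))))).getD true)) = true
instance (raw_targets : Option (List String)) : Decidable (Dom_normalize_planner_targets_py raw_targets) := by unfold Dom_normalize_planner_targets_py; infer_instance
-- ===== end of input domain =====

-- B replaces A's three inline branch-with-dedup loops by one expansion table folded into a flat
-- list plus a single dict.fromkeys dedup pass (objective: simpler decomposition, same cost).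


-- ===== PORT A =====
-- A's alias_map dict literal
def pvAliasMap : PySem.Dict String String := PySem.Dict.ofList
  [("fan", "fan"), ("relay", "fan"),
   ("red", "red_light"), ("red light", "red_light"), ("red_light", "red_light"),
   ("green", "green_light"), ("green light", "green_light"), ("green_light", "green_light")]

-- A's loop body: one item processed against the accumulated devices list
def pvStepA (devices : List String) (item : String) : List String :=
  let key := PySem.Str.lower (PySem.Str.strip item)
  if key ∈ (["all", "everything"] : List String) then
    (["fan", "red_light", "green_light"] : List String).foldl
      (fun d n => if n ∈ d then d else d ++ [n]) devices
  else if key ∈ (["all_lights", "lights", "both_lights"] : List String) then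
    (["red_light", "green_light"] : List String).foldl
      (fun d n => if n ∈ d then d else d ++ [n]) devices
  else
    match PySem.Dict.get? pvAliasMap key with
    | some mapped => if mapped ∈ devices then devices else devices ++ [mapped]
    | none => devices

-- The isinstance(raw_targets, str) / not-list guards cannot fire on Option (List String).
def normalize_planner_targets_py (raw_targets : Option (List String)) : List String :=
  match raw_targets with
  | none => []
  | some xs => xs.foldl pvStepA []

-- ===== PORT B =====
-- B's unified expansion table (_EXPANSION)
def pvExpansion : PySem.Dict String (List String) := PySem.Dict.ofList
  [("all", ["fan", "red_light", "green_light"]),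
   ("everything", ["fan", "red_light", "green_light"]),
   ("all_lights", ["red_light", "green_light"]),
   ("lights", ["red_light", "green_light"]),
   ("both_lights", ["red_light", "green_light"]),
   ("fan", ["fan"]), ("relay", ["fan"]),
   ("red", ["red_light"]), ("red light", ["red_light"]), ("red_light", ["red_light"]),
   ("green", ["green_light"]), ("green light", ["green_light"]), ("green_light", ["green_light"])]

def normalize_planner_targets_py_alt (raw_targets : Option (List String)) : List String :=
  match raw_targets with
  | none => []
  | some xs =>
    PySem.List.dedup
      (xs.foldl
        (fun acc item =>
          acc ++ PySem.Dict.getD pvExpansion (PySem.Str.lower (PySem.Str.strip item)) [])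
        [])

-- ===== PRECONDITION & SPEC =====
def Spec_normalize_planner_targets_py (raw_targets : Option (List String)) (out : List String) : Prop := out = normalize_planner_targets_py_alt raw_targets
instance (raw_targets : Option (List String)) (out : List String) : Decidable (Spec_normalize_planner_targets_py raw_targets out) := by unfold Spec_normalize_planner_targets_py; infer_instance

-- ===== CLAIM (what is proved, stated in full; the proofs are below) =====
def Claim_equal_normalize_planner_targets_py : Prop := ∀ (raw_targets : Option (List String)), Dom_normalize_planner_targets_py raw_targets → Spec_normalize_planner_targets_py raw_targets (normalize_planner_targets_py raw_targets)

-- ===== LEMMAS AND PROOFS =====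

-- the two dict literals, evaluated to their association lists
theorem pvExpansion_mk : pvExpansion = PySem.Dict.mk
  [("all", ["fan", "red_light", "green_light"]),
   ("everything", ["fan", "red_light", "green_light"]),
   ("all_lights", ["red_light", "green_light"]),
   ("lights", ["red_light", "green_light"]),
   ("both_lights", ["red_light", "green_light"]),
   ("fan", ["fan"]), ("relay", ["fan"]),
   ("red", ["red_light"]), ("red light", ["red_light"]), ("red_light", ["red_light"]),
   ("green", ["green_light"]), ("green light", ["green_light"]), ("green_light", ["green_light"])] := by decide

theorem pvAliasMap_mk : pvAliasMap = PySem.Dict.mk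
  [("fan", "fan"), ("relay", "fan"),
   ("red", "red_light"), ("red light", "red_light"), ("red_light", "red_light"),
   ("green", "green_light"), ("green light", "green_light"), ("green_light", "green_light")] := by decide

-- B's table lookup, characterised by A's branch structure
theorem pv_get_eq (k : String) :
    PySem.Dict.getD pvExpansion k [] =
      if k = "all" ∨ k = "everything" then ["fan", "red_light", "green_light"]
      else if k = "all_lights" ∨ k = "lights" ∨ k = "both_lights" then ["red_light", "green_light"]
      else match PySem.Dict.get? pvAliasMap k with
           | some m => [m]
           | none => [] := by
  rw [pvExpansion_mk, pvAliasMap_mk]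
  simp only [PySem.Dict.getD, PySem.Dict.get?_mk_cons, beq_iff_eq]
  by_cases h1 : "all" = k <;> by_cases h2 : "everything" = k <;>
  by_cases h3 : "all_lights" = k <;> by_cases h4 : "lights" = k <;>
  by_cases h5 : "both_lights" = k <;> simp_all [eq_comm]
  split_ifs <;> simp [PySem.Dict.get?]

-- Set.add is A's append-if-absent (BEq on String is lawful)
theorem pv_add_eq (d : List String) (n : String) :
    PySem.Set.add d n = if n ∈ d then d else d ++ [n] := by
  simp [PySem.Set.add, List.contains_eq_mem]

-- A's per-item step appends exactly B's expansion of the item's key, first-occurrence style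
theorem pv_step_eq (devices : List String) (item : String) :
    pvStepA devices item =
      (PySem.Dict.getD pvExpansion (PySem.Str.lower (PySem.Str.strip item)) []).foldl
        PySem.Set.add devices := by
  unfold pvStepA
  generalize PySem.Str.lower (PySem.Str.strip item) = k
  rw [pv_get_eq]
  simp only [List.mem_cons, List.not_mem_nil, or_false]
  split_ifs with hA hL
  · simp [List.foldl_cons, pv_add_eq]
  · simp [List.foldl_cons, pv_add_eq]
  · cases PySem.Dict.get? pvAliasMap k <;> simp [pv_add_eq]

-- folding A's step over the items = folding append-if-absent over the concatenated expansions
theorem pv_fold_eq (xs : List String) (devices : List String) :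
    xs.foldl pvStepA devices =
      (xs.foldl
        (fun acc item =>
          acc ++ PySem.Dict.getD pvExpansion (PySem.Str.lower (PySem.Str.strip item)) [])
        []).foldl PySem.Set.add devices := by
  rw [PySem.List.foldl_append_eq_flatMap, List.nil_append]
  induction xs generalizing devices with
  | nil => simp
  | cons x xs ih =>
    rw [List.foldl_cons, List.flatMap_cons, List.foldl_append, ih, pv_step_eq]

-- ===== VERDICT (by name: the statement is the Claim_ definition above) =====
theorem normalize_planner_targets_py_spec : Claim_equal_normalize_planner_targets_py := by
  intro raw_targets _
  unfold Spec_normalize_planner_targets_py normalize_planner_targets_py normalize_planner_targets_py_alt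
  cases raw_targets with
  | none => rfl
  | some xs =>
    simp only [pv_fold_eq, PySem.List.dedup_eq_ofList, PySem.Set.ofList]
    rfl
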